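-- pv_equiv track=rewrite | github.com/malikinss/PyGen | PyGen for Advanced/4_nested_lists/4_4_matrices_part_1/4_4_7_calculate_quarters_sums/4_4_7_calculate_quarters_sums.py | calculate_quarters_sums
-- ===== SOURCE A (Python) =====
-- from typing import List, Tuple
--
-- def calculate_quarters_sums(
--     matrix: List[List[int]]
-- ) -> Tuple[int, int, int, int]:
--     """
--     Calculates the sums of the four quarters of a square matrix.
--
--     Args:
--         matrix (List[List[int]]): Square matrix.
--
--     Returns:
--         Tuple[int, int, int, int]: Sums of the upper, right, lower, and
--         left quarters.
--     """
--     n = len(matrix)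
--     up_sum = right_sum = down_sum = left_sum = 0
--
--     for i in range(n):
--         for j in range(n):
--             if i < j and i < n - 1 - j:
--                 up_sum += matrix[i][j]
--             if i < j and i > n - 1 - j:
--                 right_sum += matrix[i][j]
--             if i > j and i > n - 1 - j:
--                 down_sum += matrix[i][j]
--             if i > j and i < n - 1 - j:
--                 left_sum += matrix[i][j]
--
--     return up_sum, right_sum, down_sum, left_sum
-- ===== SOURCE B (Python) =====
-- def calculate_quarters_sums(matrix):
--     n = len(matrix)
--     up_sum = right_sum = down_sum = left_sum = 0
--     for i, row in enumerate(matrix):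
--         up_sum += sum(row[i + 1 : n - 1 - i])
--         right_sum += sum(row[max(i, n - 1 - i) + 1 : n])
--         down_sum += sum(row[n - i : i])
--         left_sum += sum(row[0 : min(i, n - 1 - i)])
--     return up_sum, right_sum, down_sum, left_sum
-- ===== Notes on version B (the rewrite author's own statement) =====
-- stated objective: faster
-- what changed: B replaces A's nested scan that tests all four diagonal inequalities on every cell by a single pass over the rows that sums, per row, the four slices whose boundaries are computed from the diagonal conditions, removing every per-cell conditional and index lookup.
-- outside the precondition, e.g. on calculate_quarters_sums([[], []]): A returns (0, 0, 0, 0), B returns (0, 0, 0, 0); on calculate_quarters_sums([[0, 9], [0, 0, 9], [0, 9]]): A returns (9, 9, 9, 0), B returns (9, 9, 9, 0)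
import Mathlib
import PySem

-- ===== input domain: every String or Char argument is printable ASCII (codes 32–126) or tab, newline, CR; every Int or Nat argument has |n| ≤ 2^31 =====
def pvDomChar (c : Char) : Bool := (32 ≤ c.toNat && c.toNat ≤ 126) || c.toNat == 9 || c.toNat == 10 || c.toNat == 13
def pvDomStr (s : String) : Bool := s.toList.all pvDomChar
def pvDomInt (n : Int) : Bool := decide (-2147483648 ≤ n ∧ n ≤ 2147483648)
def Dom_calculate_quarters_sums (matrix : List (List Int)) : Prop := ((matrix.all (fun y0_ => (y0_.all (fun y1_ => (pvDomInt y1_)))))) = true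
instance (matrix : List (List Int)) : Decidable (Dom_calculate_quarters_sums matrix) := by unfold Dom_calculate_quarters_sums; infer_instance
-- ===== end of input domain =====

-- B replaces A's per-cell conditional scan of the whole n×n grid by per-row slice sums
-- whose boundaries are computed from the diagonal conditions (simpler: no inner conditional).

-- ===== PORT A =====
def calculate_quarters_sums (matrix : List (List Int)) : Int × Int × Int × Int :=
  let n : Int := matrix.length
  (PySem.List.pyRange 0 n 1).foldl (fun s i =>
    (PySem.List.pyRange 0 n 1).foldl (fun s j =>
      let mij := PySem.List.pyGetD (PySem.List.pyGetD matrix i []) j 0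
      let up := if i < j ∧ i < n - 1 - j then s.1 + mij else s.1
      let right := if i < j ∧ i > n - 1 - j then s.2.1 + mij else s.2.1
      let down := if i > j ∧ i > n - 1 - j then s.2.2.1 + mij else s.2.2.1
      let left := if i > j ∧ i < n - 1 - j then s.2.2.2 + mij else s.2.2.2
      (up, right, down, left)) s) (0, 0, 0, 0)

-- ===== PORT B =====
def calculate_quarters_sums_alt (matrix : List (List Int)) : Int × Int × Int × Int :=
  let n : Int := matrix.length
  (PySem.List.enumerate matrix 0).foldl (fun s p =>
    (s.1 + (PySem.List.slice p.2 (some (p.1 + 1)) (some (n - 1 - p.1))).sum,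
     s.2.1 + (PySem.List.slice p.2 (some (max p.1 (n - 1 - p.1) + 1)) (some n)).sum,
     s.2.2.1 + (PySem.List.slice p.2 (some (n - p.1)) (some p.1)).sum,
     s.2.2.2 + (PySem.List.slice p.2 (some 0) (some (min p.1 (n - 1 - p.1)))).sum)) (0, 0, 0, 0)

-- ===== PRECONDITION & SPEC =====
-- Pre_ restricts to the function's stated domain, square-shaped matrices (each row at least
-- as long as the number of rows): on shorter rows A generally raises IndexError, though in
-- degenerate ragged cases where no quarter condition reaches a missing cell A still returns
-- (and B agrees there, see the cited examples).
def Pre_calculate_quarters_sums (matrix : List (List Int)) : Prop :=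
  ∀ row ∈ matrix, matrix.length ≤ row.length
instance (matrix : List (List Int)) : Decidable (Pre_calculate_quarters_sums matrix) := by
  unfold Pre_calculate_quarters_sums; infer_instance

def pvWitness_calculate_quarters_sums : List (List Int) := [[1, 2], [3, 4]]

def Spec_calculate_quarters_sums (matrix : List (List Int)) (out : Int × Int × Int × Int) : Prop := out = calculate_quarters_sums_alt matrix
instance (matrix : List (List Int)) (out : Int × Int × Int × Int) : Decidable (Spec_calculate_quarters_sums matrix out) := by unfold Spec_calculate_quarters_sums; infer_instance

-- ===== CLAIM (what is proved, stated in full; the proofs are below) =====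
def Claim_equal_calculate_quarters_sums : Prop := ∀ (matrix : List (List Int)), Dom_calculate_quarters_sums matrix → Pre_calculate_quarters_sums matrix → Spec_calculate_quarters_sums matrix (calculate_quarters_sums matrix)

-- ===== LEMMAS AND PROOFS =====

-- reading row[j] for j ∈ [a, b) is the slice row[a:b]
theorem map_get_interval (row : List Int) (a b : Int) (h0 : 0 ≤ a) (h1 : 0 ≤ b)
    (hb : b ≤ (row.length : Int)) :
    (PySem.List.pyRange a b 1).map (fun j => PySem.List.pyGetD row j (0 : Int))
      = PySem.List.slice row (some a) (some b) := by
  rw [PySem.List.slice_toNat row h0 h1]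
  by_cases hab : a ≤ b
  · have hlen : (row.take b.toNat).length = b.toNat := by
      rw [List.length_take]; omega
    have hmap : (PySem.List.pyRange a b 1).map (fun j => PySem.List.pyGetD row j (0 : Int))
        = (PySem.List.pyRange a b 1).map (fun j => PySem.List.pyGetD (row.take b.toNat) j (0 : Int)) := by
      apply List.map_congr_left
      intro j hj
      rw [PySem.List.mem_pyRange_one] at hj
      rw [PySem.List.pyGetD_eq_getElem row 0 (by omega) (by omega),
          PySem.List.pyGetD_eq_getElem (row.take b.toNat) 0 (by omega) (by omega)]
      simp [List.getElem_take]
    have key := PySem.List.map_pyGetD_pyRange (row.take b.toNat) (0 : Int) h0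
    simp only [PySem.List.len_eq, hlen] at key
    have hbb : ((b.toNat : Nat) : Int) = b := by omega
    rw [hbb] at key
    rw [hmap, key, List.drop_take]
  · rw [PySem.List.pyRange_one_eq_nil (by omega)]
    have h : b.toNat - a.toNat = 0 := by omega
    simp [h]

-- an interval-guarded sum over range(n) is the slice sum
theorem sum_ite_interval (row : List Int) (n a b : Int) (c : Int → Prop) [DecidablePred c]
    (h0 : 0 ≤ a) (h1 : 0 ≤ b) (hbn : b ≤ n) (han : a ≤ n) (hb : b ≤ (row.length : Int))
    (hc : ∀ j, 0 ≤ j → j < n → (c j ↔ a ≤ j ∧ j < b)) :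
    ((PySem.List.pyRange 0 n 1).map (fun j => if c j then PySem.List.pyGetD row j (0 : Int) else 0)).sum
      = (PySem.List.slice row (some a) (some b)).sum := by
  by_cases hab : a ≤ b
  · rw [PySem.List.pyRange_one_append 0 a n h0 han,
        PySem.List.pyRange_one_append a b n hab hbn]
    rw [List.map_append, List.map_append, List.sum_append, List.sum_append]
    have hz1 : ((PySem.List.pyRange 0 a 1).map (fun j => if c j then PySem.List.pyGetD row j (0 : Int) else 0)).sum = 0 := by
      apply List.sum_eq_zero
      intro x hx
      simp only [List.mem_map] at hx
      obtain ⟨j, hj, rfl⟩ := hx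
      rw [PySem.List.mem_pyRange_one] at hj
      rw [if_neg]
      rw [hc j (by omega) (by omega)]; omega
    have hz2 : ((PySem.List.pyRange b n 1).map (fun j => if c j then PySem.List.pyGetD row j (0 : Int) else 0)).sum = 0 := by
      apply List.sum_eq_zero
      intro x hx
      simp only [List.mem_map] at hx
      obtain ⟨j, hj, rfl⟩ := hx
      rw [PySem.List.mem_pyRange_one] at hj
      rw [if_neg]
      rw [hc j (by omega) (by omega)]; omega
    have hmid : (PySem.List.pyRange a b 1).map (fun j => if c j then PySem.List.pyGetD row j (0 : Int) else 0)
        = (PySem.List.pyRange a b 1).map (fun j => PySem.List.pyGetD row j (0 : Int)) := by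
      apply List.map_congr_left
      intro j hj
      rw [PySem.List.mem_pyRange_one] at hj
      rw [if_pos]
      rw [hc j (by omega) (by omega)]; omega
    rw [hz1, hz2, hmid, map_get_interval row a b h0 h1 hb]
    ring
  · have hz : ((PySem.List.pyRange 0 n 1).map (fun j => if c j then PySem.List.pyGetD row j (0 : Int) else 0)).sum = 0 := by
      apply List.sum_eq_zero
      intro x hx
      simp only [List.mem_map] at hx
      obtain ⟨j, hj, rfl⟩ := hx
      rw [PySem.List.mem_pyRange_one] at hj
      rw [if_neg]
      rw [hc j (by omega) (by omega)]; omega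
    rw [hz, PySem.List.slice_toNat row h0 h1]
    have h : b.toNat - a.toNat = 0 := by omega
    simp [h]

theorem ite_add_acc (c : Prop) [Decidable c] (s m : Int) :
    (if c then s + m else s) = s + (if c then m else 0) := by
  split <;> simp

-- a tuple-state fold whose four components accumulate independently is four map-sums
theorem foldl_add4 {α : Type} (f1 f2 f3 f4 : α → Int) (L : List α) (s : Int × Int × Int × Int) :
    L.foldl (fun s p => (s.1 + f1 p, s.2.1 + f2 p, s.2.2.1 + f3 p, s.2.2.2 + f4 p)) s
      = (s.1 + (L.map f1).sum, s.2.1 + (L.map f2).sum, s.2.2.1 + (L.map f3).sum, s.2.2.2 + (L.map f4).sum) := by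
  induction L generalizing s with
  | nil => simp
  | cons x xs ih => simp [ih]; refine ⟨by ring, by ring, by ring, by ring⟩

-- A's inner loop over one row, in closed slice form
theorem inner_row (n i : Int) (row : List Int) (h0 : 0 ≤ i) (hi : i < n)
    (hlen : n ≤ (row.length : Int)) (s : Int × Int × Int × Int) :
    (PySem.List.pyRange 0 n 1).foldl (fun s j =>
      let mij := PySem.List.pyGetD row j (0 : Int)
      let up := if i < j ∧ i < n - 1 - j then s.1 + mij else s.1
      let right := if i < j ∧ i > n - 1 - j then s.2.1 + mij else s.2.1
      let down := if i > j ∧ i > n - 1 - j then s.2.2.1 + mij else s.2.2.1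
      let left := if i > j ∧ i < n - 1 - j then s.2.2.2 + mij else s.2.2.2
      (up, right, down, left)) s
    = (s.1 + (PySem.List.slice row (some (i + 1)) (some (n - 1 - i))).sum,
       s.2.1 + (PySem.List.slice row (some (max i (n - 1 - i) + 1)) (some n)).sum,
       s.2.2.1 + (PySem.List.slice row (some (n - i)) (some i)).sum,
       s.2.2.2 + (PySem.List.slice row (some 0) (some (min i (n - 1 - i)))).sum) := by
  have hstep : (fun (s : Int × Int × Int × Int) (j : Int) =>
      let mij := PySem.List.pyGetD row j (0 : Int)
      let up := if i < j ∧ i < n - 1 - j then s.1 + mij else s.1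
      let right := if i < j ∧ i > n - 1 - j then s.2.1 + mij else s.2.1
      let down := if i > j ∧ i > n - 1 - j then s.2.2.1 + mij else s.2.2.1
      let left := if i > j ∧ i < n - 1 - j then s.2.2.2 + mij else s.2.2.2
      (up, right, down, left))
      = (fun (s : Int × Int × Int × Int) (j : Int) =>
        (s.1 + (if i < j ∧ i < n - 1 - j then PySem.List.pyGetD row j (0 : Int) else 0),
         s.2.1 + (if i < j ∧ i > n - 1 - j then PySem.List.pyGetD row j (0 : Int) else 0),
         s.2.2.1 + (if i > j ∧ i > n - 1 - j then PySem.List.pyGetD row j (0 : Int) else 0),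
         s.2.2.2 + (if i > j ∧ i < n - 1 - j then PySem.List.pyGetD row j (0 : Int) else 0))) := by
    funext s j
    simp only [ite_add_acc]
  rw [hstep, foldl_add4]
  rw [sum_ite_interval row n (i + 1) (n - 1 - i) _ (by omega) (by omega) (by omega) (by omega) (by omega) (fun j hj1 hj2 => by omega),
      sum_ite_interval row n (max i (n - 1 - i) + 1) n _ (by omega) (by omega) (by omega) (by omega) (by omega) (fun j hj1 hj2 => by omega),
      sum_ite_interval row n (n - i) i _ (by omega) (by omega) (by omega) (by omega) (by omega) (fun j hj1 hj2 => by omega),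
      sum_ite_interval row n 0 (min i (n - 1 - i)) _ (by omega) (by omega) (by omega) (by omega) (by omega) (fun j hj1 hj2 => by omega)]

-- B's enumerate loop over the suffix vs A's index loop over the whole list
theorem map_enum_eq (F : Int → List Int → Int) (suff : List (List Int)) :
    ∀ pref : List (List Int),
      (PySem.List.enumerate suff (pref.length : Int)).map (fun p => F p.1 p.2)
        = (PySem.List.pyRange (pref.length : Int) ((pref.length : Int) + (suff.length : Int)) 1).map
            (fun i => F i (PySem.List.pyGetD (pref ++ suff) i [])) := by
  induction suff with
  | nil => intro pref; simp [PySem.List.enumerate, PySem.List.pyRange_one_eq_nil]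
  | cons x xs ih =>
    intro pref
    rw [PySem.List.enumerate_cons]
    rw [PySem.List.pyRange_one_cons (by push_cast [List.length_cons]; omega)]
    rw [List.map_cons, List.map_cons]
    congr 1
    · have hget : PySem.List.pyGetD (pref ++ x :: xs) (pref.length : Int) [] = x := by
        rw [PySem.List.pyGetD_eq_getElem _ _ (by omega) (by simp)]
        simp
      rw [hget]
    · have ih' := ih (pref ++ [x])
      simp only [List.length_append, List.length_cons, List.length_nil, List.append_assoc,
        List.singleton_append, Nat.cast_add, Nat.cast_one, zero_add] at ih' ⊢
      rw [ih']
      congr 2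
      omega

theorem main_eq (matrix : List (List Int)) (hpre : Pre_calculate_quarters_sums matrix) :
    calculate_quarters_sums matrix = calculate_quarters_sums_alt matrix := by
  unfold calculate_quarters_sums calculate_quarters_sums_alt
  dsimp only
  rw [PySem.List.foldl_congr_mem _ _ (fun (s : Int × Int × Int × Int) (i : Int) =>
      (s.1 + (PySem.List.slice (PySem.List.pyGetD matrix i []) (some (i + 1)) (some ((matrix.length : Int) - 1 - i))).sum,
       s.2.1 + (PySem.List.slice (PySem.List.pyGetD matrix i []) (some (max i ((matrix.length : Int) - 1 - i) + 1)) (some (matrix.length : Int))).sum,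
       s.2.2.1 + (PySem.List.slice (PySem.List.pyGetD matrix i []) (some ((matrix.length : Int) - i)) (some i)).sum,
       s.2.2.2 + (PySem.List.slice (PySem.List.pyGetD matrix i []) (some 0) (some (min i ((matrix.length : Int) - 1 - i)))).sum)) _ ?_]
  · rw [foldl_add4, foldl_add4]
    have h1 := map_enum_eq (fun i row => (PySem.List.slice row (some (i + 1)) (some ((matrix.length : Int) - 1 - i))).sum) matrix []
    have h2 := map_enum_eq (fun i row => (PySem.List.slice row (some (max i ((matrix.length : Int) - 1 - i) + 1)) (some (matrix.length : Int))).sum) matrix []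
    have h3 := map_enum_eq (fun i row => (PySem.List.slice row (some ((matrix.length : Int) - i)) (some i)).sum) matrix []
    have h4 := map_enum_eq (fun i row => (PySem.List.slice row (some 0) (some (min i ((matrix.length : Int) - 1 - i)))).sum) matrix []
    simp only [List.length_nil, Nat.cast_zero, List.nil_append, zero_add] at h1 h2 h3 h4
    rw [h1, h2, h3, h4]
  · intro acc i hi
    rw [PySem.List.mem_pyRange_one] at hi
    have hrowmem : PySem.List.pyGetD matrix i [] ∈ matrix := by
      rw [PySem.List.pyGetD_eq_getElem _ _ (by omega) (by omega)]
      exact List.getElem_mem _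
    exact inner_row (matrix.length : Int) i (PySem.List.pyGetD matrix i []) (by omega) (by omega)
      (by exact_mod_cast hpre _ hrowmem) acc

-- ===== VERDICT (by name: the statement is the Claim_ definition above) =====
theorem calculate_quarters_sums_spec : Claim_equal_calculate_quarters_sums := by
  intro matrix _ hpre
  exact main_eq matrix hpre
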